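-- pv_equiv track=rewrite | github.com/Anvay-joshi/CN_assignments_project | IP_fragmentation/ip_fragmentation_calculator.py | calculate_ip_fragments
-- ===== SOURCE A (Python) =====
-- def calculate_ip_fragments(data_size, mtu, ip_header_size):
--     if data_size <= 0 or mtu <= 0 or ip_header_size < 0:
--         return "Invalid input values."
--
--     max_payload_size = mtu - ip_header_size
--
--     num_fragments = (data_size + max_payload_size - 1) // max_payload_size
--
--     total_length = data_size
--     fragments = []
--     offset = 0
--
--     for i in range(num_fragments):
--         payload_size = max_payload_size - (max_payload_size % 8) if i < num_fragments - 1 else data_size - offset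
--
--         #more flag: 0 for only last fragment
--         mf_flag = 1 if i < num_fragments - 1 else 0
--
--         temp_len = 0
--         if i < num_fragments - 1:
--             temp_len = payload_size + ip_header_size
--         else:
--             temp_len = payload_size - ip_header_size
--         fragments.append({
--             "Fragment": i + 1,
--             "Total Length": temp_len,  # Including IP header size
--             "MF Flag": mf_flag,
--             "Offset": offset // 8
--         })
--
--         offset += payload_size
--
--     return num_fragments, fragments
-- ===== SOURCE B (Python) =====
-- def calculate_ip_fragments(data_size, mtu, ip_header_size):
--     if data_size <= 0 or mtu <= 0 or ip_header_size < 0: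
--         return "Invalid input values."
--
--     max_payload_size = mtu - ip_header_size
--     num_fragments = (data_size + max_payload_size - 1) // max_payload_size
--
--     # every non-last fragment carries the 8-aligned payload, so the
--     # offset of fragment i is simply i * aligned: no running accumulator
--     aligned = max_payload_size - max_payload_size % 8
--     step = aligned // 8
--
--     fragments = [
--         {
--             "Fragment": i + 1,
--             "Total Length": aligned + ip_header_size,
--             "MF Flag": 1,
--             "Offset": i * step,
--         }
--         for i in range(num_fragments - 1)
--     ]
--     if num_fragments >= 1:
--         last_payload = data_size - (num_fragments - 1) * aligned
--         fragments.append({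
--             "Fragment": num_fragments,
--             "Total Length": last_payload - ip_header_size,
--             "MF Flag": 0,
--             "Offset": (num_fragments - 1) * aligned // 8,
--         })
--     return num_fragments, fragments
-- ===== Notes on version B (the rewrite author's own statement) =====
-- stated objective: simpler
-- what changed: Replaces the stateful loop threading a mutable offset accumulator with a closed-form comprehension (offset of fragment i is i*(aligned//8)) over the full fragments plus a separate tail append for the last fragment.
-- outside the precondition, e.g. on calculate_ip_fragments(0, 1, 0): A returns 'Invalid input values.', B returns 'Invalid input values.'
import Mathlib
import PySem

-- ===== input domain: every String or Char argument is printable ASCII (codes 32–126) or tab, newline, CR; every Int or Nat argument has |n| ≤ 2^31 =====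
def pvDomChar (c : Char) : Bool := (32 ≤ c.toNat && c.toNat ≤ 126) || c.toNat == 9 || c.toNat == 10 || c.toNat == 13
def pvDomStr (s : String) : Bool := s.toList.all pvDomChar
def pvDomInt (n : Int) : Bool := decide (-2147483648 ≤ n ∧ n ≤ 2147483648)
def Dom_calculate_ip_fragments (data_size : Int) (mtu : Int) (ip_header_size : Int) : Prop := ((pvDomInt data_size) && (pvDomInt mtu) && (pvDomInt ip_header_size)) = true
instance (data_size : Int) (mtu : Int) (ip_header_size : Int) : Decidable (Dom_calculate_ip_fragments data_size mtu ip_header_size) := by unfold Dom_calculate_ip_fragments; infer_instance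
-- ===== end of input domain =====

-- B replaces A's loop with its mutable running offset by a closed-form comprehension
-- (offset of fragment i = i * (aligned // 8)) plus a separate tail append: simpler, same cost.

-- ===== PORT A =====
-- Python returns the string "Invalid input values." on the guard branch (not a value of the
-- declared type) — that branch is excluded by Pre_; the port returns (0, []) there.
def calculate_ip_fragments (data_size : Int) (mtu : Int) (ip_header_size : Int) : Int × (List (List (String × Int))) :=
  if data_size ≤ 0 ∨ mtu ≤ 0 ∨ ip_header_size < 0 then (0, [])
  else
    let max_payload_size := mtu - ip_header_size
    let num_fragments := PySem.Int.floordiv (data_size + max_payload_size - 1) max_payload_size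
    let res := (PySem.List.pyRange 0 num_fragments 1).foldl
      (fun (st : List (List (String × Int)) × Int) i =>
        let payload_size := if i < num_fragments - 1
          then max_payload_size - PySem.Int.mod max_payload_size 8
          else data_size - st.2
        let mf_flag : Int := if i < num_fragments - 1 then 1 else 0
        let temp_len := if i < num_fragments - 1
          then payload_size + ip_header_size
          else payload_size - ip_header_size
        (st.1 ++ [[("Fragment", i + 1), ("Total Length", temp_len), ("MF Flag", mf_flag),
                   ("Offset", PySem.Int.floordiv st.2 8)]],
         st.2 + payload_size))
      ([], 0)
    (num_fragments, res.1)

-- ===== PORT B =====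
def calculate_ip_fragments_alt (data_size : Int) (mtu : Int) (ip_header_size : Int) : Int × (List (List (String × Int))) :=
  if data_size ≤ 0 ∨ mtu ≤ 0 ∨ ip_header_size < 0 then (0, [])
  else
    let max_payload_size := mtu - ip_header_size
    let num_fragments := PySem.Int.floordiv (data_size + max_payload_size - 1) max_payload_size
    let aligned := max_payload_size - PySem.Int.mod max_payload_size 8
    let step := PySem.Int.floordiv aligned 8
    let fragments := (PySem.List.pyRange 0 (num_fragments - 1) 1).map
      (fun i => [("Fragment", i + 1), ("Total Length", aligned + ip_header_size),
                 ("MF Flag", (1 : Int)), ("Offset", i * step)])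
    let fragments := if num_fragments ≥ 1
      then fragments ++ [[("Fragment", num_fragments),
                          ("Total Length", (data_size - (num_fragments - 1) * aligned) - ip_header_size),
                          ("MF Flag", (0 : Int)),
                          ("Offset", PySem.Int.floordiv ((num_fragments - 1) * aligned) 8)]]
      else fragments
    (num_fragments, fragments)

-- ===== PRECONDITION & SPEC =====
-- Pre_ excludes (a) the guard branch, where Python A returns the string "Invalid input values."
-- instead of a value of the declared pair type, and (b) mtu = ip_header_size, where A (and B)
-- raise ZeroDivisionError.
def Pre_calculate_ip_fragments (data_size : Int) (mtu : Int) (ip_header_size : Int) : Prop :=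
  0 < data_size ∧ 0 < mtu ∧ 0 ≤ ip_header_size ∧ mtu ≠ ip_header_size
instance (data_size : Int) (mtu : Int) (ip_header_size : Int) : Decidable (Pre_calculate_ip_fragments data_size mtu ip_header_size) := by unfold Pre_calculate_ip_fragments; infer_instance
def pvWitness_calculate_ip_fragments : Int × Int × Int := (100, 40, 20)

def Spec_calculate_ip_fragments (data_size : Int) (mtu : Int) (ip_header_size : Int) (out : Int × (List (List (String × Int)))) : Prop := out = calculate_ip_fragments_alt data_size mtu ip_header_size
instance (data_size : Int) (mtu : Int) (ip_header_size : Int) (out : Int × (List (List (String × Int)))) : Decidable (Spec_calculate_ip_fragments data_size mtu ip_header_size out) := by unfold Spec_calculate_ip_fragments; infer_instance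

-- ===== CLAIM (what is proved, stated in full; the proofs are below) =====
def Claim_equal_calculate_ip_fragments : Prop := ∀ (data_size : Int) (mtu : Int) (ip_header_size : Int), Dom_calculate_ip_fragments data_size mtu ip_header_size → Pre_calculate_ip_fragments data_size mtu ip_header_size → Spec_calculate_ip_fragments data_size mtu ip_header_size (calculate_ip_fragments data_size mtu ip_header_size)

-- ===== LEMMAS AND PROOFS =====

-- exact division of a multiple of 8
theorem pv_floordiv_mul8 (q : Int) : PySem.Int.floordiv (q * 8) 8 = q := by
  rw [PySem.Int.floordiv_eq_ediv_of_pos (by norm_num), Int.mul_ediv_cancel _ (by norm_num)]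

-- aligned is an exact multiple of 8 and step is the cofactor
theorem pv_aligned_eq (mps : Int) :
    mps - PySem.Int.mod mps 8 = PySem.Int.floordiv (mps - PySem.Int.mod mps 8) 8 * 8 := by
  have h := PySem.Int.floordiv_mul_add_mod mps 8
  have h1 : mps - PySem.Int.mod mps 8 = PySem.Int.floordiv mps 8 * 8 := by omega
  rw [h1, pv_floordiv_mul8]

-- the loop invariant: over the first m iterations (all non-last) A's fold produces exactly
-- B's mapped records, with the running offset equal to m * aligned
theorem pv_loop_prefix (ds hdr nf mps : Int) :
    ∀ (m : Nat), (m : Int) ≤ nf - 1 →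
    (PySem.List.pyRange 0 (m : Int) 1).foldl
      (fun (st : List (List (String × Int)) × Int) i =>
        let payload_size := if i < nf - 1 then mps - PySem.Int.mod mps 8 else ds - st.2
        let mf_flag : Int := if i < nf - 1 then 1 else 0
        let temp_len := if i < nf - 1 then payload_size + hdr else payload_size - hdr
        (st.1 ++ [[("Fragment", i + 1), ("Total Length", temp_len), ("MF Flag", mf_flag),
                   ("Offset", PySem.Int.floordiv st.2 8)]], st.2 + payload_size))
      ([], 0)
    = ((PySem.List.pyRange 0 (m : Int) 1).map
        (fun i => [("Fragment", i + 1), ("Total Length", (mps - PySem.Int.mod mps 8) + hdr),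
                   ("MF Flag", (1 : Int)),
                   ("Offset", i * PySem.Int.floordiv (mps - PySem.Int.mod mps 8) 8)]),
       (m : Int) * (mps - PySem.Int.mod mps 8)) := by
  intro m
  induction m with
  | zero => intro _; simp
  | succ m ih =>
    intro hm
    have hm' : (m : Int) ≤ nf - 1 := by push_cast at hm ⊢; omega
    have hlt : (m : Int) < nf - 1 := by push_cast at hm; omega
    have hsplit : PySem.List.pyRange 0 ((m + 1 : Nat) : Int) 1
        = PySem.List.pyRange 0 (m : Int) 1 ++ [(m : Int)] := by
      have : ((m + 1 : Nat) : Int) = (m : Int) + 1 := by push_cast; ring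
      rw [this, PySem.List.pyRange_one_succ_right (by positivity)]
    rw [hsplit, List.foldl_append, ih hm', List.map_append]
    simp only [List.foldl_cons, List.foldl_nil, List.map_cons, List.map_nil, if_pos hlt]
    rw [Prod.mk.injEq]
    constructor
    · have : PySem.Int.floordiv ((m : Int) * (mps - PySem.Int.mod mps 8)) 8
          = (m : Int) * PySem.Int.floordiv (mps - PySem.Int.mod mps 8) 8 := by
        conv_lhs => rw [pv_aligned_eq mps, ← mul_assoc, pv_floordiv_mul8]
      rw [this]
    · push_cast; ring

-- ===== VERDICT (by name: the statement is the Claim_ definition above) =====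
theorem calculate_ip_fragments_spec : Claim_equal_calculate_ip_fragments := by
  intro ds mtu hdr _ hpre
  obtain ⟨hds, hmtu, hhdr, hne⟩ := hpre
  unfold Spec_calculate_ip_fragments calculate_ip_fragments calculate_ip_fragments_alt
  rw [if_neg (by omega), if_neg (by omega)]
  simp only []
  set mps := mtu - hdr with hmps
  set nf := PySem.Int.floordiv (ds + mps - 1) mps with hnf
  clear_value mps nf
  by_cases h1 : 1 ≤ nf
  · -- split A's range at nf - 1 and fold the final step by hand
    have hsplit : PySem.List.pyRange 0 nf 1
        = PySem.List.pyRange 0 (nf - 1) 1 ++ [nf - 1] := by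
      have : nf = (nf - 1) + 1 := by ring
      rw [this, PySem.List.pyRange_one_succ_right (by omega)]
      ring_nf
    have hm : ((nf - 1).toNat : Int) = nf - 1 := Int.toNat_of_nonneg (by omega)
    rw [hsplit, List.foldl_append]
    rw [show PySem.List.pyRange 0 (nf - 1) 1 = PySem.List.pyRange 0 ((nf - 1).toNat : Int) 1
        from by rw [hm]]
    rw [pv_loop_prefix ds hdr nf mps (nf - 1).toNat (by omega)]
    simp only [List.foldl_cons, List.foldl_nil, if_neg (lt_irrefl (nf - 1)), if_pos h1, hm]
    rw [Prod.mk.injEq]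
    refine ⟨rfl, ?_⟩
    rw [sub_add_cancel]
  · -- nf ≤ 0: empty ranges on both sides
    have h2 : (nf - 0).toNat = 0 := by omega
    have h3 : (nf - 1 - 0).toNat = 0 := by omega
    have hA : PySem.List.pyRange 0 nf 1 = [] := by
      rw [PySem.List.pyRange_one, h2]; simp
    have hB : PySem.List.pyRange 0 (nf - 1) 1 = [] := by
      rw [PySem.List.pyRange_one, h3]; simp
    rw [hA, hB]
    simp [if_neg h1]
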